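-- pv_equiv track=rewrite | github.com/pioneerwatermelon/Collatzgrammar | ter.py | ternary_to_decimal
-- ===== SOURCE A (Python) =====
-- def ternary_to_decimal(s):
-- 	value = 0
-- 	for digit in s:
-- 		value *= 3
-- 		if digit == "+":
-- 			value += 1
-- 		elif digit == "-":
-- 			value -= 1
-- 		elif digit == "0":
-- 			pass
-- 	return value
-- ===== SOURCE B (Python) =====
-- def ternary_to_decimal(s):
--     total = 0
--     weight = 1
--     for ch in reversed(s):
--         if ch == "+":
--             total += weight
--         elif ch == "-":
--             total -= weight
--         weight *= 3
--     return total
-- ===== Notes on version B (the rewrite author's own statement) =====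
-- stated objective: alternative
-- what changed: Replaced Horner's left-to-right multiply-accumulate with a positional place-value evaluation: traverse the string right-to-left keeping an explicit power-of-3 weight and add/subtract it into a running sum.
import Mathlib
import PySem

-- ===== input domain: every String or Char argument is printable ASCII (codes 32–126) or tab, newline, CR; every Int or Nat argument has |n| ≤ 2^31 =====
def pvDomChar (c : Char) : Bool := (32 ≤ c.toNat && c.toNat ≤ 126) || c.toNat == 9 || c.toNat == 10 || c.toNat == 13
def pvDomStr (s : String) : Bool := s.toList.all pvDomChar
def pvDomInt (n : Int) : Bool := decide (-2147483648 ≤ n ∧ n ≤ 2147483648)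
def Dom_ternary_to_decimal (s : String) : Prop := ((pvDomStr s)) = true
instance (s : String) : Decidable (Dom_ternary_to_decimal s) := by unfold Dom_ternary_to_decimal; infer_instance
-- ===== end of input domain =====

-- B replaces A's left-to-right Horner fold by a right-to-left place-value sum with an explicit power-of-3 weight; alternative decomposition, same cost.

-- ===== PORT A =====
def ternary_to_decimal (s : String) : Int :=
  s.toList.foldl (fun value digit =>
    let value := value * 3
    if digit = '+' then value + 1
    else if digit = '-' then value - 1
    else if digit = '0' then value
    else value) 0

-- ===== PORT B =====
def ternary_to_decimal_alt (s : String) : Int :=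
  (s.toList.reverse.foldl (fun p ch =>
    (if ch = '+' then p.1 + p.2
     else if ch = '-' then p.1 - p.2
     else p.1, p.2 * 3)) ((0 : Int), (1 : Int))).1

-- ===== PRECONDITION & SPEC =====
def Spec_ternary_to_decimal (s : String) (out : Int) : Prop := out = ternary_to_decimal_alt s
instance (s : String) (out : Int) : Decidable (Spec_ternary_to_decimal s out) := by unfold Spec_ternary_to_decimal; infer_instance

-- ===== CLAIM (what is proved, stated in full; the proofs are below) =====
def Claim_equal_ternary_to_decimal : Prop := ∀ (s : String), Dom_ternary_to_decimal s → Spec_ternary_to_decimal s (ternary_to_decimal s)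

-- ===== LEMMAS AND PROOFS =====

def pvDv (c : Char) : Int := if c = '+' then 1 else if c = '-' then -1 else 0

-- reversed-Horner value: R m = Σ_i dv m[i] * 3^i
def pvR : List Char → Int
  | [] => 0
  | c :: t => pvDv c + 3 * pvR t

theorem pvA_fold (l : List Char) (acc : Int) :
    l.foldl (fun value digit =>
      let value := value * 3
      if digit = '+' then value + 1
      else if digit = '-' then value - 1
      else if digit = '0' then value
      else value) acc = acc * 3 ^ l.length + pvR l.reverse := by
  induction l generalizing acc with
  | nil => simp [pvR]
  | cons c t ih =>
    have happ : ∀ (m : List Char) (x : Char),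
        pvR (m ++ [x]) = pvR m + pvDv x * 3 ^ m.length := by
      intro m x
      induction m with
      | nil => simp [pvR]; try ring
      | cons y u ihm => simp [pvR, ihm]; try ring
    simp only [List.foldl_cons, ih, List.reverse_cons, happ, List.length_reverse,
      List.length_cons, pvDv]
    by_cases h1 : c = '+' <;> by_cases h2 : c = '-' <;> by_cases h3 : c = '0' <;>
      simp [h1, h2, h3] <;> try ring

theorem pvB_fold (m : List Char) (t w : Int) :
    (m.foldl (fun p ch =>
      (if ch = '+' then p.1 + p.2
       else if ch = '-' then p.1 - p.2
       else p.1, p.2 * 3)) (t, w)).1 = t + w * pvR m := by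
  induction m generalizing t w with
  | nil => simp [pvR]
  | cons c u ih =>
    simp only [List.foldl_cons, ih, pvR, pvDv]
    by_cases h1 : c = '+' <;> by_cases h2 : c = '-' <;> simp [h1, h2] <;> try ring

theorem ternary_to_decimal_eq (s : String) :
    ternary_to_decimal s = ternary_to_decimal_alt s := by
  unfold ternary_to_decimal ternary_to_decimal_alt
  rw [pvA_fold, pvB_fold]
  ring

-- ===== VERDICT (by name: the statement is the Claim_ definition above) =====
theorem ternary_to_decimal_spec : Claim_equal_ternary_to_decimal := by
  intro s _
  unfold Spec_ternary_to_decimal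
  exact ternary_to_decimal_eq s
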